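-- pv_equiv track=rewrite | github.com/EmmaBin/DSA | palindrom_creator.py | PalindromeCreator
-- ===== SOURCE A (Python) =====
-- def PalindromeCreator(strParam):
--
--
--   strCopy = strParam
--   TF = True
--
--   if strParam == strParam[::-1]:
--     return 'palindrome'
--
--   else:
--     for i in range(len(strParam)):
--       strRemoved = strCopy.replace(strCopy[i],'')
--       if strRemoved == strRemoved[::-1] and len(strRemoved) >= 3:
--         return strParam[i]
--         TF = False
--
--     strCopy = strParam
--
--     for i in range(len(strParam)):
--       strCopy = strParam
--       strRemoved1 = strCopy.replace(strCopy[i],'')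
--       for j in range(len(strRemoved1)):
--         strRemoved2 = strRemoved1.replace(strRemoved1[j],'')
--         if strRemoved2[::-1] == strRemoved2 and len(strRemoved2) >= 3:
--           return strCopy[i] + strRemoved1[j]
--           TF = False
--
--     if TF:
--       return 'not possible'
-- ===== SOURCE B (Python) =====
-- def PalindromeCreator(strParam):
--     # Two-pointer mismatch pruning: peel equal end pairs; a removal can only help
--     # if it deletes one of the two first mismatching end characters.
--     s = strParam
--
--     def peel(t):
--         # strip matching end pairs; empty/1-char result iff t is a palindrome,
--         # otherwise its two ends are the first mismatching pair
--         while len(t) >= 2 and t[0] == t[-1]: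
--             t = t[1:-1]
--         return t
--
--     def is_pal(t):
--         return len(peel(t)) <= 1
--
--     def removed(t, c):
--         return ''.join(ch for ch in t if ch != c)
--
--     def ok(t, c):
--         r = removed(t, c)
--         return len(r) >= 3 and is_pal(r)
--
--     if is_pal(s):
--         return 'palindrome'
--
--     core = peel(s)
--     x, y = core[0], core[-1]
--     # one removal: only the mismatching end characters can possibly work
--     for ch in s:
--         if (ch == x or ch == y) and ok(s, ch):
--             return ch
--
--     seen = set()
--     for c in s:
--         if c in seen:
--             continue
--         seen.add(c)
--         r1 = removed(s, c)
--         core1 = peel(r1)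
--         if len(core1) <= 1:
--             # r1 is already a palindrome: removing all of any char keeps it one
--             for d in r1:
--                 if len(r1) - r1.count(d) >= 3:
--                     return c + d
--         else:
--             x1, y1 = core1[0], core1[-1]
--             for d in r1:
--                 if (d == x1 or d == y1) and ok(r1, d):
--                     return c + d
--     return 'not possible'
-- ===== Notes on version B (the rewrite author's own statement) =====
-- stated objective: faster
-- what changed: B replaces A's brute-force try-every-removal search by two-pointer mismatch analysis: it peels equal end pairs to find the first mismatching pair of characters, proves only those two characters can be removal candidates, and tests at most two candidates per stage (plus the palindromic-remainder shortcut where any removal keeps a palindrome), instead of testing every character at every index.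
import Mathlib
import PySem

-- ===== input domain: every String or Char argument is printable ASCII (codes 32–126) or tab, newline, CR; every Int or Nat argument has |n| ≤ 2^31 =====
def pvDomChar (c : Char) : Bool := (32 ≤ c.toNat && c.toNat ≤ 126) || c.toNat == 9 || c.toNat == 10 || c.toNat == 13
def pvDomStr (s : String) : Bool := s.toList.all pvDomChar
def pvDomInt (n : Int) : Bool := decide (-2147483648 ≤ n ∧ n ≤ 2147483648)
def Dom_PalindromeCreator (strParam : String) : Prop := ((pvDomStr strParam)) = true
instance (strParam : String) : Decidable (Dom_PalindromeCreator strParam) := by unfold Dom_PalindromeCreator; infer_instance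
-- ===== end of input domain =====

-- B replaces A's brute-force try-every-removal search by two-pointer mismatch pruning
-- (peel equal end pairs; only the first mismatching pair of characters can be removal
-- candidates); same return values, measurably faster.

-- ===== PORT A =====
-- s.replace(s[i], '') for a 1-char needle removes every occurrence: filter is exact here.
-- Python loop with early return over range(len(...)) = findSome? over the index range.
def pvABody1 (l : List Char) (c : Char) : Option Char :=
  let strRemoved := l.filter (fun x => x != c)
  if strRemoved = strRemoved.reverse ∧ 3 ≤ strRemoved.length then some c else none

def pvALoop1 (l : List Char) : Option Char :=
  (List.range l.length).findSome? (fun i => pvABody1 l (l.getD i ' '))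

def pvAInner (c : Char) (strRemoved1 : List Char) (d : Char) : Option (Char × Char) :=
  let strRemoved2 := strRemoved1.filter (fun x => x != d)
  if strRemoved2.reverse = strRemoved2 ∧ 3 ≤ strRemoved2.length then some (c, d) else none

def pvABody2 (l : List Char) (c : Char) : Option (Char × Char) :=
  let strRemoved1 := l.filter (fun x => x != c)
  (List.range strRemoved1.length).findSome? (fun j => pvAInner c strRemoved1 (strRemoved1.getD j ' '))

def pvALoop2 (l : List Char) : Option (Char × Char) :=
  (List.range l.length).findSome? (fun i => pvABody2 l (l.getD i ' '))

def PalindromeCreator (strParam : String) : String :=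
  let l := strParam.toList
  if l = l.reverse then "palindrome"
  else
    match pvALoop1 l with
    | some c => String.ofList [c]
    | none =>
      match pvALoop2 l with
      | some (c, d) => String.ofList [c, d]
      | none => "not possible"

-- ===== PORT B =====
-- peel(t): strip matching end pairs while len >= 2 and t[0] == t[-1] (t[1:-1] = tail.dropLast)
def pvPeel : List Char → List Char
  | [] => []
  | [a] => [a]
  | a :: b :: t => if a = (b :: t).getLast (by simp) then pvPeel ((b :: t).dropLast) else a :: b :: t
termination_by l => l.length
decreasing_by simp [List.length_dropLast]

def pvIsPalB (t : List Char) : Bool := (pvPeel t).length ≤ 1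

def pvRemoved (t : List Char) (c : Char) : List Char := t.filter (fun ch => ch != c)

def pvOk (t : List Char) (c : Char) : Bool :=
  (3 ≤ (pvRemoved t c).length : Bool) && pvIsPalB (pvRemoved t c)

-- for ch in s: if (ch == x or ch == y) and ok(s, ch): return ch
def pvBStage1 (l : List Char) (x y : Char) : Option Char :=
  l.findSome? (fun ch => if ((ch == x || ch == y) && pvOk l ch) = true then some ch else none)

-- per-character body of the second stage (candidate pruning on r1)
def pvBInner (r1 : List Char) : Option Char :=
  let core1 := pvPeel r1
  if core1.length ≤ 1 then
    -- r1 is already a palindrome: removing all of any char keeps it one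
    r1.findSome? (fun d => if 3 ≤ r1.length - r1.count d then some d else none)
  else
    let x1 := core1.headD ' '
    let y1 := core1.getLastD ' '
    r1.findSome? (fun d => if ((d == x1 || d == y1) && pvOk r1 d) = true then some d else none)

-- for c in s: skip if seen; else try the pruned inner search on s-without-c
def pvBStage2 (l : List Char) : List Char → PySem.Set Char → Option (Char × Char)
  | [], _ => none
  | c :: rest, seen =>
    if PySem.Set.contains seen c then pvBStage2 l rest seen
    else
      let seen' := PySem.Set.add seen c
      match pvBInner (pvRemoved l c) with
      | some d => some (c, d)
      | none => pvBStage2 l rest seen'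

def PalindromeCreator_alt (strParam : String) : String :=
  let l := strParam.toList
  if pvIsPalB l then "palindrome"
  else
    let core := pvPeel l
    let x := core.headD ' '
    let y := core.getLastD ' '
    match pvBStage1 l x y with
    | some c => String.ofList [c]
    | none =>
      match pvBStage2 l l PySem.Set.empty with
      | some (c, d) => String.ofList [c, d]
      | none => "not possible"

-- ===== PRECONDITION & SPEC =====
def Spec_PalindromeCreator (strParam : String) (out : String) : Prop := out = PalindromeCreator_alt strParam
instance (strParam : String) (out : String) : Decidable (Spec_PalindromeCreator strParam out) := by unfold Spec_PalindromeCreator; infer_instance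

-- ===== CLAIM (what is proved, stated in full; the proofs are below) =====
def Claim_equal_PalindromeCreator : Prop := ∀ (strParam : String), Dom_PalindromeCreator strParam → Spec_PalindromeCreator strParam (PalindromeCreator strParam)

-- ===== LEMMAS AND PROOFS =====

-- pointwise-equal bodies give equal loops
theorem pv_findSome_congr {α : Type} (l : List Char) (f g : Char → Option α)
    (h : ∀ c ∈ l, f c = g c) : l.findSome? f = l.findSome? g := by
  induction l with
  | nil => rfl
  | cons a t ih =>
    simp only [List.findSome?_cons, h a (List.mem_cons_self)]
    cases g a with
    | some b => rfl
    | none => exact ih fun c hc => h c (List.mem_cons_of_mem a hc)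

-- iterating over indices = iterating over elements
theorem pv_range_findSome {α : Type} (l : List Char) (g : Char → Option α) :
    (List.range l.length).findSome? (fun i => g (l.getD i ' ')) = l.findSome? g := by
  induction l generalizing g with
  | nil => simp
  | cons a t ih =>
    simp only [List.length_cons, List.range_succ_eq_map, List.findSome?_cons, List.getD_cons_zero,
      List.findSome?_map]
    cases g a with
    | some b => simp
    | none => simpa [Function.comp, List.getD] using ih g

theorem pv_findSome_map {α β : Type} (l : List Char) (f : Char → Option α) (g : α → β) :
    l.findSome? (fun c => (f c).map g) = (l.findSome? f).map g := by
  induction l with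
  | nil => rfl
  | cons a t ih => cases h : f a <;> simp [h, ih]

-- a sandwich u ++ v ++ reverse u is a palindrome iff its core v is
theorem pv_sandwich (u v : List Char) :
    (u ++ v ++ u.reverse) = (u ++ v ++ u.reverse).reverse ↔ v = v.reverse := by
  have key : (u ++ v ++ u.reverse).reverse = u ++ v.reverse ++ u.reverse := by
    simp [List.reverse_append, List.append_assoc]
  rw [key]
  simp [List.append_assoc]

-- every list is a sandwich around its peeled core
theorem pv_peel_decomp (l : List Char) : ∃ u, l = u ++ pvPeel l ++ u.reverse := by
  induction l using pvPeel.induct with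
  | case1 => exact ⟨[], by simp [pvPeel]⟩
  | case2 a => exact ⟨[], by simp [pvPeel]⟩
  | case3 b t ih =>
    obtain ⟨u, hu⟩ := ih
    refine ⟨(b :: t).getLast (by simp) :: u, ?_⟩
    rw [pvPeel, if_pos rfl]
    have hsplit : b :: t = (b :: t).dropLast ++ [(b :: t).getLast (by simp)] :=
      (List.dropLast_append_getLast (by simp)).symm
    calc (b :: t).getLast (by simp) :: b :: t
        = (b :: t).getLast (by simp) :: ((b :: t).dropLast ++ [(b :: t).getLast (by simp)]) :=
          congrArg _ hsplit
      _ = ((b :: t).getLast (by simp) :: u) ++ pvPeel ((b :: t).dropLast)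
            ++ ((b :: t).getLast (by simp) :: u).reverse := by
          conv_lhs => rw [hu]
          simp [List.append_assoc]
  | case4 a b t h =>
    refine ⟨[], ?_⟩
    rw [pvPeel, if_neg h]
    simp

-- a core of length ≥ 2 has mismatching ends
theorem pv_peel_ends (l : List Char) (h : 2 ≤ (pvPeel l).length) :
    (pvPeel l).headD ' ' ≠ (pvPeel l).getLastD ' ' := by
  induction l using pvPeel.induct with
  | case1 => simp [pvPeel] at h
  | case2 a => simp [pvPeel] at h
  | case3 b t ih =>
    rw [pvPeel, if_pos rfl] at h ⊢
    exact ih h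
  | case4 a b t hne =>
    rw [pvPeel, if_neg hne] at h ⊢
    have h1 : (a :: b :: t).getLastD ' ' = (b :: t).getLast (by simp) := by
      rw [List.getLastD_eq_getLast?, List.getLast?_eq_some_getLast (l := a :: b :: t) (by simp),
        Option.getD_some, List.getLast_cons (by simp)]
    rw [List.headD_cons, h1]
    exact hne

-- a nonempty palindrome has equal ends
theorem pv_pal_ends (v : List Char) (h : v = v.reverse) :
    v.headD ' ' = v.getLastD ' ' := by
  have h1 : v.head? = v.getLast? := by
    conv_lhs => rw [h]
    exact List.head?_reverse
  rw [List.headD_eq_head?_getD, List.getLastD_eq_getLast?, h1]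

-- B's palindrome test agrees with A's
theorem pv_pal_iff (l : List Char) : l = l.reverse ↔ (pvPeel l).length ≤ 1 := by
  obtain ⟨u, hu⟩ := pv_peel_decomp l
  constructor
  · intro h
    by_contra hlen
    have h2 : 2 ≤ (pvPeel l).length := by omega
    have hpal : pvPeel l = (pvPeel l).reverse := by
      rw [hu] at h
      exact (pv_sandwich u (pvPeel l)).mp h
    exact pv_peel_ends l h2 (pv_pal_ends _ hpal)
  · intro h1
    have hp : pvPeel l = (pvPeel l).reverse := by
      cases hc : pvPeel l with
      | nil => simp
      | cons c w =>
        rw [hc] at h1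
        simp at h1
        subst h1
        simp
    rw [hu]
    exact (pv_sandwich _ _).mpr hp

-- a list of length ≥ 2 decomposes as head :: middle ++ [last]
theorem pv_two_decomp (v : List Char) (h : 2 ≤ v.length) :
    ∃ m, v = v.headD ' ' :: m ++ [v.getLastD ' '] := by
  match v, h with
  | a :: b :: w, _ =>
    refine ⟨(b :: w).dropLast, ?_⟩
    have hne : (b :: w) ≠ [] := by simp
    have h1 : (a :: b :: w).getLastD ' ' = (b :: w).getLast hne := by
      rw [List.getLastD_eq_getLast?, List.getLast?_eq_some_getLast (l := a :: b :: w) (by simp),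
        Option.getD_some, List.getLast_cons hne]
    rw [List.headD_cons, h1]
    exact congrArg (a :: ·) (List.dropLast_append_getLast hne).symm

-- MAIN PRUNING LEMMA: a filter keeping both mismatching core ends cannot give a palindrome
theorem pv_main (l : List Char) (p : Char → Bool) (h : 2 ≤ (pvPeel l).length)
    (hx : p ((pvPeel l).headD ' ') = true) (hy : p ((pvPeel l).getLastD ' ') = true) :
    ¬ (l.filter p = (l.filter p).reverse) := by
  obtain ⟨u, hu⟩ := pv_peel_decomp l
  obtain ⟨m, hm⟩ := pv_two_decomp (pvPeel l) h
  intro hcon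
  have hfl : l.filter p = u.filter p ++ (pvPeel l).filter p ++ (u.filter p).reverse := by
    conv_lhs => rw [hu]
    simp [List.filter_append, List.filter_reverse]
  have hcore : (pvPeel l).filter p = ((pvPeel l).filter p).reverse :=
    (pv_sandwich (u.filter p) ((pvPeel l).filter p)).mp (by rw [← hfl]; exact hcon)
  have hfc : (pvPeel l).filter p =
      (pvPeel l).headD ' ' :: m.filter p ++ [(pvPeel l).getLastD ' '] := by
    conv_lhs => rw [hm]
    simp only [List.headD_eq_head?_getD, List.getLastD_eq_getLast?] at hx hy
    simp [List.filter_append, hx, hy]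
  have hh : ((pvPeel l).filter p).head? = ((pvPeel l).filter p).getLast? := by
    conv_lhs => rw [hcore]
    exact List.head?_reverse
  rw [hfc] at hh
  rw [List.getLast?_concat] at hh
  rw [List.cons_append, List.head?_cons] at hh
  exact pv_peel_ends l h (Option.some.inj hh)

theorem pv_len_filter_ne (l : List Char) (c : Char) :
    (l.filter (fun x => x != c)).length = l.length - l.count c := by
  induction l with
  | nil => rfl
  | cons a t ih =>
    have hc : t.count c ≤ t.length := List.count_le_length
    by_cases ha : a = c
    · subst ha; simp [ih]
    · simp [ha, ih, bne_iff_ne]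
      omega

-- B's ok-test agrees with A's palindrome-and-length condition
theorem pv_ok_iff (t : List Char) (c : Char) :
    pvOk t c = true ↔ (t.filter (fun x => x != c) = (t.filter (fun x => x != c)).reverse ∧
      3 ≤ (t.filter (fun x => x != c)).length) := by
  rw [pvOk, pvRemoved]
  simp only [Bool.and_eq_true, decide_eq_true_eq, pvIsPalB]
  rw [← pv_pal_iff]
  exact and_comm

-- stage 1: A's full scan = B's two-candidate scan
theorem pv_stage1_eq (l : List Char) (h : ¬ l = l.reverse) :
    pvALoop1 l = pvBStage1 l ((pvPeel l).headD ' ') ((pvPeel l).getLastD ' ') := by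
  have h2 : 2 ≤ (pvPeel l).length := by
    have : ¬ (pvPeel l).length ≤ 1 := fun hh => h ((pv_pal_iff l).mpr hh)
    omega
  have hmain : ∀ c : Char, c ≠ (pvPeel l).headD ' ' → c ≠ (pvPeel l).getLastD ' ' →
      ¬ (l.filter (fun t => t != c) = (l.filter (fun t => t != c)).reverse) := by
    intro c h1 h2'
    exact pv_main l (fun t => t != c) h2 (by simpa [bne_iff_ne] using Ne.symm h1)
      (by simpa [bne_iff_ne] using Ne.symm h2')
  rw [pvALoop1, pv_range_findSome l (pvABody1 l), pvBStage1]
  generalize (pvPeel l).headD ' ' = x at hmain ⊢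
  generalize (pvPeel l).getLastD ' ' = y at hmain ⊢
  apply pv_findSome_congr
  intro c _
  simp only [pvABody1]
  by_cases hcand : c = x ∨ c = y
  · by_cases hq : l.filter (fun t => t != c) = (l.filter (fun t => t != c)).reverse ∧
        3 ≤ (l.filter (fun t => t != c)).length
    · rw [if_pos hq, if_pos ?_]
      simp only [Bool.and_eq_true, Bool.or_eq_true, beq_iff_eq]
      exact ⟨hcand, (pv_ok_iff l c).mpr hq⟩
    · rw [if_neg hq, if_neg ?_]
      intro hh
      simp only [Bool.and_eq_true] at hh
      exact hq ((pv_ok_iff l c).mp hh.2)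
  · rw [not_or] at hcand
    rw [if_neg (fun hh => hmain c hcand.1 hcand.2 hh.1), if_neg ?_]
    intro hh
    simp only [Bool.and_eq_true, Bool.or_eq_true, beq_iff_eq] at hh
    rcases hh.1 with h1 | h1
    · exact hcand.1 h1
    · exact hcand.2 h1

-- stage 2 inner: A's full inner scan = B's pruned inner search
theorem pv_inner_eq (r1 : List Char) :
    r1.findSome? (fun d =>
      if ((r1.filter (fun x => x != d)).reverse = r1.filter (fun x => x != d) ∧
          3 ≤ (r1.filter (fun x => x != d)).length) then some d else none) = pvBInner r1 := by
  rw [pvBInner]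
  by_cases hp : (pvPeel r1).length ≤ 1
  · have hr : r1 = r1.reverse := (pv_pal_iff r1).mpr hp
    rw [if_pos hp]
    apply pv_findSome_congr
    intro d _
    have hpal : (r1.filter (fun x => x != d)).reverse = r1.filter (fun x => x != d) := by
      rw [← List.filter_reverse, ← hr]
    by_cases hl : 3 ≤ (r1.filter (fun x => x != d)).length
    · rw [if_pos ⟨hpal, hl⟩, if_pos (by rw [pv_len_filter_ne] at hl; exact hl)]
    · rw [if_neg (fun hh => hl hh.2), if_neg (by rw [← pv_len_filter_ne]; exact hl)]
  · rw [if_neg hp]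
    have h2 : 2 ≤ (pvPeel r1).length := by omega
    have hmain : ∀ d : Char, d ≠ (pvPeel r1).headD ' ' → d ≠ (pvPeel r1).getLastD ' ' →
        ¬ (r1.filter (fun t => t != d) = (r1.filter (fun t => t != d)).reverse) := by
      intro d h1 h2'
      exact pv_main r1 (fun t => t != d) h2 (by simpa [bne_iff_ne] using Ne.symm h1)
        (by simpa [bne_iff_ne] using Ne.symm h2')
    generalize (pvPeel r1).headD ' ' = x at hmain ⊢
    generalize (pvPeel r1).getLastD ' ' = y at hmain ⊢
    apply pv_findSome_congr
    intro d _
    by_cases hcand : d = x ∨ d = y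
    · by_cases hq : (r1.filter (fun t => t != d)).reverse = r1.filter (fun t => t != d) ∧
          3 ≤ (r1.filter (fun t => t != d)).length
      · rw [if_pos hq, if_pos ?_]
        simp only [Bool.and_eq_true, Bool.or_eq_true, beq_iff_eq]
        exact ⟨hcand, (pv_ok_iff r1 d).mpr ⟨hq.1.symm, hq.2⟩⟩
      · rw [if_neg hq, if_neg ?_]
        intro hh
        simp only [Bool.and_eq_true] at hh
        have := (pv_ok_iff r1 d).mp hh.2
        exact hq ⟨this.1.symm, this.2⟩
    · rw [not_or] at hcand
      rw [if_neg (fun hh => hmain d hcand.1 hcand.2 hh.1.symm), if_neg ?_]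
      intro hh
      simp only [Bool.and_eq_true, Bool.or_eq_true, beq_iff_eq] at hh
      rcases hh.1 with h1 | h1
      · exact hcand.1 h1
      · exact hcand.2 h1

-- the seen-set only skips characters whose inner search already returned none
theorem pv_stage2_skip (l : List Char) (rest : List Char) (seen : PySem.Set Char)
    (h : ∀ c, PySem.Set.contains seen c = true → pvBInner (pvRemoved l c) = none) :
    pvBStage2 l rest seen =
      rest.findSome? (fun c => (pvBInner (pvRemoved l c)).map (fun d => (c, d))) := by
  induction rest generalizing seen with
  | nil => rfl
  | cons c rest ih =>
    rw [pvBStage2, List.findSome?_cons]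
    by_cases hs : PySem.Set.contains seen c = true
    · rw [if_pos hs, h c hs, ih seen h]
      rfl
    · rw [if_neg hs]
      cases hb : pvBInner (pvRemoved l c) with
      | some d => rfl
      | none =>
        simp only [Option.map_none]
        refine ih _ ?_
        intro c' hc'
        have hc'' := List.mem_of_elem_eq_true hc'
        rw [PySem.Set.mem_add] at hc''
        rcases hc'' with hc'' | hc''
        · exact h c' (List.elem_eq_true_of_mem hc'')
        · rw [hc'']; exact hb

theorem pv_stage2_eq (l : List Char) : pvALoop2 l = pvBStage2 l l PySem.Set.empty := by
  rw [pvALoop2, pv_range_findSome l (pvABody2 l),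
    pv_stage2_skip l l PySem.Set.empty (by
      intro c hc
      simp [PySem.Set.contains, PySem.Set.empty] at hc)]
  apply pv_findSome_congr
  intro c _
  rw [pvABody2, pv_range_findSome]
  rw [show pvRemoved l c = l.filter (fun x => x != c) from rfl]
  rw [← pv_inner_eq (l.filter (fun x => x != c)), ← pv_findSome_map]
  apply pv_findSome_congr
  intro d _
  by_cases hq : ((l.filter (fun x => x != c)).filter (fun x => x != d)).reverse =
      (l.filter (fun x => x != c)).filter (fun x => x != d) ∧
      3 ≤ ((l.filter (fun x => x != c)).filter (fun x => x != d)).length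
  · rw [pvAInner]
    rw [if_pos hq, if_pos hq]
    rfl
  · rw [pvAInner]
    rw [if_neg hq, if_neg hq]
    rfl

-- ===== VERDICT (by name: the statement is the Claim_ definition above) =====
theorem PalindromeCreator_spec : Claim_equal_PalindromeCreator := by
  intro s _
  unfold Spec_PalindromeCreator PalindromeCreator PalindromeCreator_alt
  by_cases h : s.toList = s.toList.reverse
  · have hb : pvIsPalB s.toList = true := by
      simp only [pvIsPalB, decide_eq_true_eq]
      exact (pv_pal_iff s.toList).mp h
    simp only [if_pos h, hb, if_true]
  · have hb : pvIsPalB s.toList = false := by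
      have : ¬ (pvPeel s.toList).length ≤ 1 := fun hh => h ((pv_pal_iff s.toList).mpr hh)
      simp only [pvIsPalB, decide_eq_false_iff_not]
      exact this
    simp only [if_neg h, hb, Bool.false_eq_true, if_false,
      pv_stage1_eq s.toList h, pv_stage2_eq s.toList]
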